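-- pv_equiv track=rewrite | github.com/codersasank/problem-solving | geeks_for_geeks/string_rotated_by_2_places.py | isRotated
-- ===== SOURCE A (Python) =====
-- def isRotated(str1,str2):
--     n = len(str1)
--     m = len(str2)
--     if n!=m:
--         return False
--     flag = True
--     for i in range(n):
--         if str1[(i-2)%n] != str2[i]:
--             flag = False
--             break
--     if flag:
--         return True
--     flag = True
--     for i in range(n):
--         if str1[(i+2)%n] != str2[i]:
--             flag = False
--             break
--     if flag:
--         return True
--     else:
--         return False
-- ===== SOURCE B (Python) =====
-- def isRotated(str1, str2):
--     return str2 == str1[-2:] + str1[:-2] or str2 == str1[2:] + str1[:2]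
-- ===== Notes on version B (the rewrite author's own statement) =====
-- stated objective: idiomatic
-- what changed: Replaces the two char-by-char scanning loops with modular (i±2)%n indexing by building the two rotated strings with slicing (str1[-2:]+str1[:-2] and str1[2:]+str1[:2]) and comparing them to str2 directly; the explicit length check becomes unnecessary since unequal lengths make both comparisons False.
import Mathlib
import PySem

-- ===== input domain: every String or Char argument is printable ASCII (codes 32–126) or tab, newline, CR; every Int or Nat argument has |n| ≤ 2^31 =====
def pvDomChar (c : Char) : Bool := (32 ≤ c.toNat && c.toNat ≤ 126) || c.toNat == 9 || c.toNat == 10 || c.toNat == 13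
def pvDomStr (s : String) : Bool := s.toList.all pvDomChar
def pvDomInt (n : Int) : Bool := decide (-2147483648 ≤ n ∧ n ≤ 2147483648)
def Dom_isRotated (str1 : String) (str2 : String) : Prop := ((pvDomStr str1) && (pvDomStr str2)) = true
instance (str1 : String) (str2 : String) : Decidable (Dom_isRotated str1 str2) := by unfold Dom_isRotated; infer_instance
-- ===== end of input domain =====

-- B replaces A's two modular-index scanning loops by building the two slice-rotations and
-- comparing them to str2 directly (idiomatic; same O(n) cost).

-- ===== PORT A =====
def isRotated (str1 : String) (str2 : String) : Bool :=
  let n : Int := PySem.Str.len str1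
  let m : Int := PySem.Str.len str2
  if n ≠ m then false
  else
    -- first loop with break: flag stays True iff every position agrees
    let flag := (PySem.List.pyRange 0 n 1).all (fun i =>
      PySem.List.pyGet? str1.toList (PySem.Int.mod (i - 2) n)
        == PySem.List.pyGet? str2.toList i)
    if flag then true
    else
      let flag := (PySem.List.pyRange 0 n 1).all (fun i =>
        PySem.List.pyGet? str1.toList (PySem.Int.mod (i + 2) n)
          == PySem.List.pyGet? str2.toList i)
      if flag then true else false

-- ===== PORT B =====
def isRotated_alt (str1 : String) (str2 : String) : Bool :=
  let cs1 := str1.toList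
  let cs2 := str2.toList
  (cs2 == PySem.List.slice cs1 (some (-2)) none ++ PySem.List.slice cs1 none (some (-2)))
    || (cs2 == PySem.List.slice cs1 (some 2) none ++ PySem.List.slice cs1 none (some 2))

-- ===== PRECONDITION & SPEC =====
def Spec_isRotated (str1 : String) (str2 : String) (out : Bool) : Prop := out = isRotated_alt str1 str2
instance (str1 : String) (str2 : String) (out : Bool) : Decidable (Spec_isRotated str1 str2 out) := by unfold Spec_isRotated; infer_instance

-- ===== CLAIM (what is proved, stated in full; the proofs are below) =====
def Claim_equal_isRotated : Prop := ∀ (str1 : String) (str2 : String), Dom_isRotated str1 str2 → Spec_isRotated str1 str2 (isRotated str1 str2)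

-- ===== LEMMAS AND PROOFS =====

lemma rot_length (cs : List Char) (k : Nat) :
    (cs.drop k ++ cs.take k).length = cs.length := by
  simp; omega

lemma rot_getElem (cs : List Char) (k j : Nat) (hk : k ≤ cs.length) (hj : j < cs.length) :
    (cs.drop k ++ cs.take k)[j]'(by rw [rot_length]; exact hj)
      = cs[(j + k) % cs.length]'(Nat.mod_lt _ (by omega)) := by
  rw [List.getElem_append]
  split
  · next h =>
    simp only [List.length_drop] at h
    rw [List.getElem_drop]
    exact getElem_congr rfl (by rw [Nat.mod_eq_of_lt (by omega)]; omega)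
      (by omega)
  · next h =>
    simp only [List.length_drop] at h
    rw [List.getElem_take]
    exact getElem_congr rfl
      (by simp only [List.length_drop]
          rw [Nat.mod_eq_sub_mod (by omega), Nat.mod_eq_of_lt (by omega)]; omega)
      (by omega)

lemma elem_iff (cs1 cs2 : List Char) (o : Int) (k j : Nat)
    (hm : cs2.length = cs1.length) (hj : j < cs1.length)
    (hidx : (((j : Int) + o) % (cs1.length : Int)).toNat = (j + k) % cs1.length) :
    ((PySem.List.pyGet? cs1 (PySem.Int.mod ((j : Int) + o) (cs1.length : Int))
        == PySem.List.pyGet? cs2 (j : Int)) = true)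
      ↔ cs2[j]'(by omega) = cs1[(j + k) % cs1.length]'(Nat.mod_lt _ (by omega)) := by
  have hpos : 0 < cs1.length := by omega
  rw [PySem.Int.mod_eq_emod_of_pos (by exact_mod_cast hpos)]
  have h1 : ((j : Int) + o) % (cs1.length : Int) = (((j + k) % cs1.length : Nat) : Int) := by
    rw [← hidx]
    exact (Int.toNat_of_nonneg (Int.emod_nonneg _ (Int.natCast_ne_zero.mpr hpos.ne'))).symm
  rw [h1, PySem.List.pyGet?_natCast, PySem.List.pyGet?_natCast,
    List.getElem?_eq_getElem (Nat.mod_lt _ (by omega)), List.getElem?_eq_getElem (by omega)]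
  rw [beq_iff_eq, Option.some.injEq]
  exact eq_comm

lemma loop_iff (cs1 cs2 : List Char) (o : Int) (k : Nat)
    (hm : cs2.length = cs1.length) (hk : k ≤ cs1.length)
    (hidx : ∀ j : Nat, j < cs1.length →
      (((j : Int) + o) % (cs1.length : Int)).toNat = (j + k) % cs1.length) :
    (((PySem.List.pyRange 0 (cs1.length : Int) 1).all fun i =>
        PySem.List.pyGet? cs1 (PySem.Int.mod (i + o) (cs1.length : Int))
          == PySem.List.pyGet? cs2 i) = true)
      ↔ cs2 = cs1.drop k ++ cs1.take k := by
  rcases Nat.eq_zero_or_pos cs1.length with h0 | hpos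
  · have h1 : cs1 = [] := List.eq_nil_of_length_eq_zero h0
    have h2 : cs2 = [] := List.eq_nil_of_length_eq_zero (by omega)
    subst h1; subst h2
    simp
  · rw [List.all_eq_true]
    constructor
    · intro hall
      apply List.ext_getElem (by rw [rot_length]; exact hm)
      intro j hj1 hj2
      have hj : j < cs1.length := by omega
      have hmem : (j : Int) ∈ PySem.List.pyRange 0 (cs1.length : Int) 1 := by
        rw [PySem.List.mem_pyRange_one]
        constructor <;> omega
      have := (elem_iff cs1 cs2 o k j hm hj (hidx j hj)).mp (hall _ hmem)
      rw [rot_getElem cs1 k j hk hj]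
      exact this
    · intro heq i hmem
      rw [PySem.List.mem_pyRange_one] at hmem
      obtain ⟨h0i, hin⟩ := hmem
      have hj : i.toNat < cs1.length := by omega
      have hi : i = (i.toNat : Int) := by omega
      rw [hi]
      apply (elem_iff cs1 cs2 o k i.toNat hm hj (hidx i.toNat hj)).mpr
      rw [← rot_getElem cs1 k i.toNat hk hj]
      exact List.getElem_of_eq heq _

lemma hidx_left (n j : Nat) (hn : 0 < n) (hj : j < n) :
    (((j : Int) + (-2)) % (n : Int)).toNat = (j + (n - 2)) % n := by
  rcases Nat.lt_or_ge n 2 with h2 | h2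
  · -- n = 1, j = 0
    have hn1 : n = 1 := by omega
    have hj0 : j = 0 := by omega
    subst hn1; subst hj0; decide
  · have h1 : (j : Int) + (-2) = ((j + (n - 2) : Nat) : Int) - (n : Int) := by
      push_cast [Nat.cast_sub h2]; ring
    rw [h1, Int.sub_emod_right]
    rw [show ((j + (n - 2) : Nat) : Int) % (n : Int) = (((j + (n - 2)) % n : Nat) : Int) by push_cast; ring]
    exact Int.toNat_natCast _

lemma hidx_right (n j : Nat) (hn : 0 < n) (hj : j < n) :
    (((j : Int) + 2) % (n : Int)).toNat = (j + min 2 n) % n := by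
  rcases Nat.lt_or_ge n 2 with h2 | h2
  · have hn1 : n = 1 := by omega
    have hj0 : j = 0 := by omega
    subst hn1; subst hj0; decide
  · rw [min_eq_left h2]
    rw [show (j : Int) + 2 = ((j + 2 : Nat) : Int) by push_cast; ring]
    rw [show ((j + 2 : Nat) : Int) % (n : Int) = (((j + 2) % n : Nat) : Int) by push_cast; ring]
    exact Int.toNat_natCast _

lemma drop_take_two_min (cs : List Char) :
    cs.drop 2 ++ cs.take 2 = cs.drop (min 2 cs.length) ++ cs.take (min 2 cs.length) := by
  rcases le_total 2 cs.length with h | h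
  · rw [min_eq_left h]
  · rw [min_eq_right h, List.drop_of_length_le h, List.drop_of_length_le (le_refl _),
      List.take_of_length_le h, List.take_of_length_le (le_refl _)]

-- the two B-side concatenations, computed down to drop/take
lemma slices_left (cs : List Char) :
    PySem.List.slice cs (some (-2)) none ++ PySem.List.slice cs none (some (-2))
      = cs.drop (cs.length - 2) ++ cs.take (cs.length - 2) := by
  rw [PySem.List.slice_some_none, PySem.List.slice_to_neg_ofNat cs 2 (by norm_num)]
  congr 1
  rw [show (-2 : Int) = -((2 : Nat) : Int) by norm_num,
    PySem.List.clampIdx_neg_natCast _ 2 (by norm_num)]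

lemma slices_right (cs : List Char) :
    PySem.List.slice cs (some 2) none ++ PySem.List.slice cs none (some 2)
      = cs.drop (min 2 cs.length) ++ cs.take (min 2 cs.length) := by
  rw [PySem.List.slice_from cs (by norm_num : (0:Int) ≤ 2),
    PySem.List.slice_to cs (by norm_num : (0:Int) ≤ 2)]
  exact drop_take_two_min cs

lemma main_eq (s1 s2 : String) : isRotated s1 s2 = isRotated_alt s1 s2 := by
  unfold isRotated isRotated_alt
  simp only [PySem.Str.len_eq]
  by_cases hnm : s2.toList.length = s1.toList.length
  · rw [if_neg (by simp [hnm])]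
    have hA1 := loop_iff s1.toList s2.toList (-2) (s1.toList.length - 2) hnm (by omega)
      (fun j hj => hidx_left _ j (by omega) hj)
    have hA2 := loop_iff s1.toList s2.toList 2 (min 2 s1.toList.length) hnm (by omega)
      (fun j hj => hidx_right _ j (by omega) hj)
    simp only [sub_eq_add_neg] at *
    rw [slices_left, slices_right]
    split_ifs with h1 h2
    · have e1 : (s2.toList == s1.toList.drop (s1.toList.length - 2) ++ s1.toList.take (s1.toList.length - 2)) = true :=
        beq_iff_eq.mpr (hA1.mp h1)
      rw [e1]; rfl
    · have e2 : (s2.toList == s1.toList.drop (min 2 s1.toList.length) ++ s1.toList.take (min 2 s1.toList.length)) = true :=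
        beq_iff_eq.mpr (hA2.mp h2)
      rw [e2, Bool.or_true]
    · have e1 : (s2.toList == s1.toList.drop (s1.toList.length - 2) ++ s1.toList.take (s1.toList.length - 2)) = false :=
        beq_eq_false_iff_ne.mpr (fun h => h1 (hA1.mpr h))
      have e2 : (s2.toList == s1.toList.drop (min 2 s1.toList.length) ++ s1.toList.take (min 2 s1.toList.length)) = false :=
        beq_eq_false_iff_ne.mpr (fun h => h2 (hA2.mpr h))
      rw [e1, e2]; rfl
  · rw [if_pos (by intro h; exact hnm (by exact_mod_cast h.symm))]
    have hb1 : (s2.toList == PySem.List.slice s1.toList (some (-2)) none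
        ++ PySem.List.slice s1.toList none (some (-2))) = false := by
      rw [beq_eq_false_iff_ne]
      intro h
      apply hnm
      rw [h, slices_left, rot_length]
    have hb2 : (s2.toList == PySem.List.slice s1.toList (some 2) none
        ++ PySem.List.slice s1.toList none (some 2)) = false := by
      rw [beq_eq_false_iff_ne]
      intro h
      apply hnm
      rw [h, slices_right, rot_length]
    rw [hb1, hb2]
    rfl

-- ===== VERDICT (by name: the statement is the Claim_ definition above) =====
theorem isRotated_spec : Claim_equal_isRotated := by
  intro s1 s2 _
  show isRotated s1 s2 = isRotated_alt s1 s2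
  exact main_eq s1 s2
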